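-- pv_equiv track=rewrite | github.com/davidlxp/mar_explorer | services/task_handle_pr.py | turn_md_into_blocks_pr
-- ===== SOURCE A (Python) =====
-- def turn_md_into_blocks_pr(md_text: str) -> tuple[list[str], list[list[str]]]:
--     '''
--         Only for Tradeweb Press Release for now.
--         Given list of lines in markdown, split them into different blocks.
--         Only try to split by 1 level of hierarchy.
--
--         The md could look like:
--         parent_line_1
--            child_line_1
--            child_line_2
--         parent_line_2
--            child_line_1
--            child_line_2
--            child_line_3
--
--         Parent line Identification Rules (OR):
--         1. A line with no leading spaces.
--         2. A line starts with '**'.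
--
--     '''
--     def is_parent(line: str) -> bool:
--         return len(line) == len(line.lstrip(' ')) or line.strip().startswith('**')
--
--     # Split the md text into lines
--     lines = md_text.splitlines()
--
--     # :::::: Identify Parents and Children :::::: #
--
--     # Walk to identify the starting of the block (As parent) and associate children lines of it.
--     # Didn't use dict to avoid potential duplicate parent lines
--     parents = []
--     children_groups = []
--
--     # Handle edge case - if the article starts without parent line
--     if not is_parent(lines[0]):
--         current_parent = ''
--         parents.append(current_parent)
--         children_groups.append([])
--     else:
--         current_parent = None
--
--     # Normal process
--     for i, line in enumerate(lines):
--
--         # If a line starts with '**' or it's a line with no leading spaces, it's the starting of a new block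
--         if is_parent(line):
--             current_parent = line
--             parents.append(current_parent)
--             children_groups.append([])
--         else:
--             children_groups[-1].append(line)
--
--     return (parents, children_groups)
-- ===== SOURCE B (Python) =====
-- def _is_parent(line: str) -> bool:
--     return len(line) == len(line.lstrip(' ')) or line.strip().startswith('**')
--
--
-- def _lead(lines: list[str]) -> list[str]:
--     # longest prefix of non-parent lines
--     out = []
--     for l in lines:
--         if _is_parent(l):
--             break
--         out.append(l)
--     return out
--
--
-- def _blocks(lines: list[str]) -> tuple[list[str], list[list[str]]]:
--     # lines starts with a parent line (or is empty): emit (parent, children) blocks recursively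
--     if not lines:
--         return ([], [])
--     kids = _lead(lines[1:])
--     ps, gs = _blocks(lines[1 + len(kids):])
--     return ([lines[0]] + ps, [kids] + gs)
--
--
-- def turn_md_into_blocks_pr(md_text: str) -> tuple[list[str], list[list[str]]]:
--     lines = md_text.splitlines()
--     if not lines:
--         return ([], [])
--     lead = _lead(lines)
--     ps, gs = _blocks(lines[len(lead):])
--     if lead:
--         # article starts without a parent line: synthesize a '' parent for the leading lines
--         return ([''] + ps, [lead] + gs)
--     return (ps, gs)
-- ===== Notes on version B (the rewrite author's own statement) =====
-- stated objective: alternative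
-- what changed: A's single flag-driven append-as-you-go loop (mutating the last children group) is replaced by a take-prefix helper plus a recursion that emits each (parent, children-run) block by slicing at parent boundaries.
import Mathlib
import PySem

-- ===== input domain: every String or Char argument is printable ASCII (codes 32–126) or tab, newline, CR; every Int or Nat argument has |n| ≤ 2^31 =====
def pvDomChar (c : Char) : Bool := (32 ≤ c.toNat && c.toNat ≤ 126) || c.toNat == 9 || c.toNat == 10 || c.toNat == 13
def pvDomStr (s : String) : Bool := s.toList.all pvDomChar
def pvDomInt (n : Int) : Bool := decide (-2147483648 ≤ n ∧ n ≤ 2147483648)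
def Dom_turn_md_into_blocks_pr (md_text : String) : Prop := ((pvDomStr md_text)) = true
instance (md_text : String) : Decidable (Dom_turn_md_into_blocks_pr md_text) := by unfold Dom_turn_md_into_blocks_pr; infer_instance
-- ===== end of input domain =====

-- B replaces A's flag-driven append-as-you-go loop by a take-prefix helper and a recursion emitting
-- one (parent, children-run) block per step; same cost (objective: alternative).

-- ===== PORT A =====

-- hand port of line.lstrip(' ') (single-char strip set): drops leading ' ' only — exact
def pvLstripSpaces (s : String) : String := String.ofList (s.toList.dropWhile (· == ' '))

-- A's nested helper is_parent
def pvIsParent (line : String) : Bool :=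
  PySem.Str.len line == PySem.Str.len (pvLstripSpaces line)
    || PySem.Str.startswith (PySem.Str.strip line) "**"

-- children_groups[-1].append(line); on [] Python raises IndexError (unreachable inside Pre_)
def pvAppendLast (gs : List (List String)) (l : String) : List (List String) :=
  match gs with
  | [] => []
  | [g] => [g ++ [l]]
  | g :: rest => g :: pvAppendLast rest l

-- the body of A's for-loop
def pvStepA (st : List String × List (List String)) (line : String) :
    List String × List (List String) :=
  if pvIsParent line then (st.1 ++ [line], st.2 ++ [[]])
  else (st.1, pvAppendLast st.2 line)

def turn_md_into_blocks_pr (md_text : String) : List String × List (List String) :=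
  let lines := PySem.Str.splitlines md_text
  match lines with
  | [] => ([], [])  -- A raises IndexError at lines[0] here; outside Pre_
  | first :: _ =>
    let init : List String × List (List String) :=
      if pvIsParent first then ([], []) else ([""], [[]])
    lines.foldl pvStepA init

-- ===== PORT B =====

-- B's _is_parent (same Python expression as A's nested helper)
def pvIsParentAlt (line : String) : Bool :=
  PySem.Str.len line == PySem.Str.len (pvLstripSpaces line)
    || PySem.Str.startswith (PySem.Str.strip line) "**"

-- B's _lead: longest prefix of non-parent lines (loop with break)
def pvLead : List String → List String
  | [] => []
  | l :: rest => if pvIsParentAlt l then [] else l :: pvLead rest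

-- B's _blocks: recursion emitting one (parent, children-run) block per step
def pvBlocks : List String → List String × List (List String)
  | [] => ([], [])
  | l :: rest =>
    let kids := pvLead rest
    let r := pvBlocks (rest.drop kids.length)
    (l :: r.1, kids :: r.2)
termination_by lines => lines.length
decreasing_by simp [List.length_drop]

def turn_md_into_blocks_pr_alt (md_text : String) : List String × List (List String) :=
  let lines := PySem.Str.splitlines md_text
  if lines.isEmpty then ([], [])
  else
    let lead := pvLead lines
    let r := pvBlocks (lines.drop lead.length)
    if lead.isEmpty then r else ("" :: r.1, lead :: r.2)

-- ===== PRECONDITION & SPEC =====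
-- Pre_ excludes exactly the empty text: there splitlines() is [] and A raises IndexError at lines[0].
def Pre_turn_md_into_blocks_pr (md_text : String) : Prop :=
  md_text ≠ ""
instance (md_text : String) : Decidable (Pre_turn_md_into_blocks_pr md_text) := by
  unfold Pre_turn_md_into_blocks_pr; infer_instance

def pvWitness_turn_md_into_blocks_pr : String := "title\n  a\n  b"

def Spec_turn_md_into_blocks_pr (md_text : String) (out : List String × List (List String)) : Prop := out = turn_md_into_blocks_pr_alt md_text
instance (md_text : String) (out : List String × List (List String)) : Decidable (Spec_turn_md_into_blocks_pr md_text out) := by unfold Spec_turn_md_into_blocks_pr; infer_instance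

-- ===== CLAIM (what is proved, stated in full; the proofs are below) =====
def Claim_equal_turn_md_into_blocks_pr : Prop := ∀ (md_text : String), Dom_turn_md_into_blocks_pr md_text → Pre_turn_md_into_blocks_pr md_text → Spec_turn_md_into_blocks_pr md_text (turn_md_into_blocks_pr md_text)

-- ===== LEMMAS AND PROOFS =====

lemma pvIsParentAlt_eq (l : String) : pvIsParentAlt l = pvIsParent l := rfl

lemma pvAppendLast_snoc (gs : List (List String)) (g : List String) (l : String) :
    pvAppendLast (gs ++ [g]) l = gs ++ [g ++ [l]] := by
  induction gs with
  | nil => rfl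
  | cons h t ih =>
    cases t with
    | nil => simp [pvAppendLast]
    | cons h' t' => simpa [pvAppendLast] using ih

lemma pvBlocks_nil : pvBlocks [] = ([], []) := by rw [pvBlocks.eq_def]

lemma pvBlocks_cons (l : String) (rest : List String) :
    pvBlocks (l :: rest) =
      (l :: (pvBlocks (rest.drop (pvLead rest).length)).1,
       pvLead rest :: (pvBlocks (rest.drop (pvLead rest).length)).2) := by
  rw [pvBlocks.eq_def]

-- loop invariant: A's fold from a state whose last group is still being filled
lemma key (lines : List String) :
    ∀ (ps : List String) (gs : List (List String)) (g : List String),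
      lines.foldl pvStepA (ps, gs ++ [g]) =
        (ps ++ (pvBlocks (lines.drop (pvLead lines).length)).1,
         gs ++ (g ++ pvLead lines) :: (pvBlocks (lines.drop (pvLead lines).length)).2) := by
  induction lines with
  | nil => intro ps gs g; simp [pvLead, pvBlocks_nil]
  | cons l t ih =>
    intro ps gs g
    by_cases hp : pvIsParent l
    · have hlead : pvLead (l :: t) = [] := by simp [pvLead, pvIsParentAlt_eq, hp]
      have h1 : pvStepA (ps, gs ++ [g]) l = (ps ++ [l], (gs ++ [g]) ++ [[]]) := by
        simp [pvStepA, hp]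
      rw [List.foldl_cons, h1, ih (ps ++ [l]) (gs ++ [g]) [], hlead]
      simp [pvBlocks_cons]
    · have hlead : pvLead (l :: t) = l :: pvLead t := by
        simp [pvLead, pvIsParentAlt_eq, hp]
      have h1 : pvStepA (ps, gs ++ [g]) l = (ps, gs ++ [g ++ [l]]) := by
        simp [pvStepA, hp, pvAppendLast_snoc]
      rw [List.foldl_cons, h1, ih ps gs (g ++ [l]), hlead]
      simp

-- ===== VERDICT (by name: the statement is the Claim_ definition above) =====
theorem turn_md_into_blocks_pr_spec : Claim_equal_turn_md_into_blocks_pr := by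
  intro md _ _
  unfold Spec_turn_md_into_blocks_pr turn_md_into_blocks_pr turn_md_into_blocks_pr_alt
  cases hl : PySem.Str.splitlines md with
  | nil => rfl  -- both ports return ([], []) on an empty line list (A itself raises there; Pre_ excludes it)
  | cons first t =>
    simp only [List.isEmpty_cons, Bool.false_eq_true, if_false]
    by_cases hp : pvIsParent first
    · rw [if_pos hp]
      have hlead : pvLead (first :: t) = [] := by simp [pvLead, pvIsParentAlt_eq, hp]
      rw [hlead]
      simp only [List.isEmpty_nil, if_true, List.length_nil, List.drop_zero]
      have h1 : pvStepA (([] : List String), ([] : List (List String))) first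
          = ([first], [] ++ [[]]) := by simp [pvStepA, hp]
      rw [List.foldl_cons, h1, key t [first] [] []]
      simp [pvBlocks_cons]
    · rw [if_neg hp]
      have hlead : pvLead (first :: t) = first :: pvLead t := by
        simp [pvLead, pvIsParentAlt_eq, hp]
      rw [hlead]
      simp only [List.isEmpty_cons, Bool.false_eq_true, if_false]
      have h0 : (([""], [[]]) : List String × List (List String)) = ([""], [] ++ [[]]) := rfl
      rw [h0, key (first :: t) [""] [] [], hlead]
      simp
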